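-- pv_equiv track=rewrite | github.com/jasonmpittman/coding-exercises | exercises/fibonacci_string.py | build_substring
-- ===== SOURCE A (Python) =====
-- def build_substring(length: int, first_letter: str, second_letter: str) -> str:
--     substring = ''
--
--     if length == 0:
--         substring = first_letter
--         return substring
--     elif length == 1:
--         substring = second_letter
--         return substring
--     else:
--         for i in range(1, length + 1):
--             if i % 2 != 0:
--                 substring += second_letter
--             else:
--                 substring += first_letter   #   more correctly, we should += substring when len >= 2
--         return substring
-- ===== SOURCE B (Python) =====
-- def build_substring(length: int, first_letter: str, second_letter: str) -> str:
--     if length == 0: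
--         return first_letter
--     if length == 1:
--         return second_letter
--     pairs = (second_letter + first_letter) * (length // 2)
--     return pairs + (second_letter if length > 0 and length % 2 == 1 else '')
-- ===== Notes on version B (the rewrite author's own statement) =====
-- stated objective: simpler
-- what changed: Replaces A's per-index parity loop with a closed-form build: the pair (second_letter+first_letter) repeated length//2 times plus one trailing second_letter when length is positive and odd.
import Mathlib
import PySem

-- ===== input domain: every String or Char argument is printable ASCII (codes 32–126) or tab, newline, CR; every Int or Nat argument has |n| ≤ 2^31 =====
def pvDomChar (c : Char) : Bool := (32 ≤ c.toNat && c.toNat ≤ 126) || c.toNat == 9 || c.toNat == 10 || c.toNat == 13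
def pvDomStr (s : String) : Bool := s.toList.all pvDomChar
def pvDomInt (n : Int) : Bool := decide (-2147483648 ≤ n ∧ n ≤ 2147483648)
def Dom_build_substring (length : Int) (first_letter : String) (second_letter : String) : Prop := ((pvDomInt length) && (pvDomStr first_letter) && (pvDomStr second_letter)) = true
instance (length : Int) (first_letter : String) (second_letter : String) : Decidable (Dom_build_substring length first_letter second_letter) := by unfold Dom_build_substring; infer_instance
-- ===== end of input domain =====

-- B replaces A's element-by-element append loop by a closed-form repetition of the
-- two-letter pair plus an optional odd tail (objective: simpler).

-- ===== PORT A =====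
-- literal port of A's loop: for i in range(1, length+1): substring += second/first by parity of i
def build_substring (length : Int) (first_letter : String) (second_letter : String) : String :=
  if length = 0 then first_letter
  else if length = 1 then second_letter
  else
    String.ofList
      ((PySem.List.pyRange 1 (length + 1) 1).foldl
        (fun acc i =>
          if PySem.Int.mod i 2 ≠ 0 then acc ++ second_letter.toList
          else acc ++ first_letter.toList)
        [])

-- ===== PORT B =====
-- pairs = (second_letter + first_letter) * (length // 2); plus second_letter iff length > 0 and odd
-- (Python's str * k is '' for k ≤ 0, hence .toNat on the floor quotient)
def build_substring_alt (length : Int) (first_letter : String) (second_letter : String) : String :=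
  if length = 0 then first_letter
  else if length = 1 then second_letter
  else
    String.ofList
      ((List.replicate (PySem.Int.floordiv length 2).toNat
          (second_letter.toList ++ first_letter.toList)).flatten ++
        (if 0 < length ∧ PySem.Int.mod length 2 = 1 then second_letter.toList else []))

-- ===== PRECONDITION & SPEC =====
def Spec_build_substring (length : Int) (first_letter : String) (second_letter : String) (out : String) : Prop := out = build_substring_alt length first_letter second_letter
instance (length : Int) (first_letter : String) (second_letter : String) (out : String) : Decidable (Spec_build_substring length first_letter second_letter out) := by unfold Spec_build_substring; infer_instance

-- ===== CLAIM (what is proved, stated in full; the proofs are below) =====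
def Claim_equal_build_substring : Prop := ∀ (length : Int) (first_letter : String) (second_letter : String), Dom_build_substring length first_letter second_letter → Spec_build_substring length first_letter second_letter (build_substring length first_letter second_letter)

-- ===== LEMMAS AND PROOFS =====

-- A's loop over range(1, n+1) equals B's closed form, for natural n
theorem pv_loop_closed (n : Nat) (F S : List Char) :
    (PySem.List.pyRange 1 ((n : Int) + 1) 1).foldl
      (fun acc i =>
        if PySem.Int.mod i 2 ≠ 0 then acc ++ S else acc ++ F) []
    = (List.replicate (n / 2) (S ++ F)).flatten ++ (if n % 2 = 1 then S else []) := by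
  induction n with
  | zero => simp [PySem.List.pyRange_one_eq_nil]
  | succ n ih =>
    have hsplit : PySem.List.pyRange 1 ((↑(n + 1) : Int) + 1) 1
        = PySem.List.pyRange 1 ((n : Int) + 1) 1 ++ [(n : Int) + 1] := by
      have h := PySem.List.pyRange_one_succ_right (a := 1) (b := (n : Int) + 1) (by omega)
      push_cast
      exact h
    have hmod : PySem.Int.mod ((n : Int) + 1) 2 = (((n + 1) % 2 : Nat) : Int) := by
      exact_mod_cast PySem.Int.mod_natCast (n + 1) 2
    rw [show ((↑(n + 1) : Int) + 1) = ((n : Int) + 1 + 1) by push_cast; ring]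
    push_cast at hsplit
    rw [hsplit, List.foldl_append, ih, List.foldl_cons, List.foldl_nil, hmod]
    rcases Nat.even_or_odd n with he | ho
    · have h1 : (n + 1) % 2 = 1 := by rcases he with ⟨k, hk⟩; omega
      have h2 : ¬ (n % 2 = 1) := by rcases he with ⟨k, hk⟩; omega
      have h3 : (n + 1) / 2 = n / 2 := by rcases he with ⟨k, hk⟩; omega
      simp [h1, h2, h3]
    · have h1 : (n + 1) % 2 = 0 := by rcases ho with ⟨k, hk⟩; omega
      have h2 : n % 2 = 1 := by rcases ho with ⟨k, hk⟩; omega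
      have h3 : (n + 1) / 2 = n / 2 + 1 := by rcases ho with ⟨k, hk⟩; omega
      simp [h1, h2, h3, List.replicate_succ']

-- ===== VERDICT (by name: the statement is the Claim_ definition above) =====
theorem build_substring_spec : Claim_equal_build_substring := by
  intro L f s _hdom
  unfold Spec_build_substring build_substring build_substring_alt
  by_cases h0 : L = 0
  · simp [h0]
  by_cases h1 : L = 1
  · simp [h1]
  simp only [h0, h1, if_false]
  rcases Int.lt_or_le L 0 with hneg | hpos
  · -- negative length: A's range is empty, B's quotient is negative (→ 0 repetitions), guard false
    have hnil : PySem.List.pyRange 1 (L + 1) 1 = [] :=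
      PySem.List.pyRange_one_eq_nil (by omega)
    have hq : PySem.Int.floordiv L 2 < 0 :=
      (PySem.Int.floordiv_lt_iff_lt_mul (by omega)).mpr (by omega)
    have hq0 : (PySem.Int.floordiv L 2).toNat = 0 := by omega
    have hg : ¬ (0 < L ∧ PySem.Int.mod L 2 = 1) := fun h => absurd h.1 (by omega)
    rw [hnil, List.foldl_nil, hq0, if_neg hg]
    rfl
  · -- L ≥ 2: write L as a natural number and apply the closed-form loop lemma
    have h2 : 2 ≤ L := by omega
    obtain ⟨n, rfl⟩ : ∃ n : Nat, L = (n : Int) := ⟨L.toNat, (Int.toNat_of_nonneg hpos).symm⟩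
    have hq : (PySem.Int.floordiv (n : Int) 2).toNat = n / 2 := by
      have h := PySem.Int.floordiv_natCast n 2
      norm_cast at h
      omega
    have hm : PySem.Int.mod (n : Int) 2 = ((n % 2 : Nat) : Int) :=
      by exact_mod_cast PySem.Int.mod_natCast n 2
    have hg : (0 < (n : Int) ∧ PySem.Int.mod (n : Int) 2 = 1) ↔ n % 2 = 1 := by
      rw [hm]; constructor
      · intro h; exact_mod_cast h.2
      · intro h; exact ⟨by omega, by exact_mod_cast h⟩
    rw [pv_loop_closed n f.toList s.toList, hq]
    by_cases hpar : n % 2 = 1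
    · rw [if_pos hpar, if_pos (hg.mpr hpar)]
    · rw [if_neg hpar, if_neg (fun h => hpar (hg.mp h))]
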